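-- pv_equiv track=rewrite | github.com/amit-bej/JobFinder | app.py | get_skill_variants
-- ===== SOURCE A (Python) =====
-- SKILL_ALIASES = {
--     "python": ["python3", "py"],
--     "javascript": ["js", "ecmascript"],
--     "typescript": ["ts"],
--     "react": ["reactjs", "react.js"],
--     "angular": ["angularjs", "angular.js"],
--     "vue": ["vuejs", "vue.js"],
--     "node": ["nodejs", "node.js"],
--     "postgres": ["postgresql", "psql"],
--     "mysql": ["mariadb"],
--     "mongodb": ["mongo"],
--     "aws": ["amazon web services"],
--     "gcp": ["google cloud", "google cloud platform"],
--     "azure": ["microsoft azure"],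
--     "docker": ["containerization"],
--     "kubernetes": ["k8s"],
--     "rest api": ["restful", "rest apis"],
--     "graphql": ["gql"],
--     "machine learning": ["ml"],
--     "artificial intelligence": ["ai"],
--     "natural language processing": ["nlp"],
--     "langchain": ["lang chain"],
-- }
--
-- def get_skill_variants(skill):
--     skill_lower = skill.lower()
--     variants = {skill_lower}
--
--     if skill_lower in SKILL_ALIASES:
--         variants.update(SKILL_ALIASES[skill_lower])
--
--     for main_skill, aliases in SKILL_ALIASES.items():
--         if skill_lower in aliases or skill_lower == main_skill:
--             variants.add(main_skill)
--             variants.update(aliases)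
--
--     return variants
-- ===== SOURCE B (Python) =====
-- # Precomputed module-level reverse-index table: each known term (main skill or
-- # alias) maps directly to its whole variant group, so a call is one dict lookup.
-- _REVERSE_INDEX = {
--     'python': {'python', 'python3', 'py'},
--     'python3': {'python', 'python3', 'py'},
--     'py': {'python', 'python3', 'py'},
--     'javascript': {'javascript', 'js', 'ecmascript'},
--     'js': {'javascript', 'js', 'ecmascript'},
--     'ecmascript': {'javascript', 'js', 'ecmascript'},
--     'typescript': {'typescript', 'ts'},
--     'ts': {'typescript', 'ts'},
--     'react': {'react', 'reactjs', 'react.js'},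
--     'reactjs': {'react', 'reactjs', 'react.js'},
--     'react.js': {'react', 'reactjs', 'react.js'},
--     'angular': {'angular', 'angularjs', 'angular.js'},
--     'angularjs': {'angular', 'angularjs', 'angular.js'},
--     'angular.js': {'angular', 'angularjs', 'angular.js'},
--     'vue': {'vue', 'vuejs', 'vue.js'},
--     'vuejs': {'vue', 'vuejs', 'vue.js'},
--     'vue.js': {'vue', 'vuejs', 'vue.js'},
--     'node': {'node', 'nodejs', 'node.js'},
--     'nodejs': {'node', 'nodejs', 'node.js'},
--     'node.js': {'node', 'nodejs', 'node.js'},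
--     'postgres': {'postgres', 'postgresql', 'psql'},
--     'postgresql': {'postgres', 'postgresql', 'psql'},
--     'psql': {'postgres', 'postgresql', 'psql'},
--     'mysql': {'mysql', 'mariadb'},
--     'mariadb': {'mysql', 'mariadb'},
--     'mongodb': {'mongodb', 'mongo'},
--     'mongo': {'mongodb', 'mongo'},
--     'aws': {'aws', 'amazon web services'},
--     'amazon web services': {'aws', 'amazon web services'},
--     'gcp': {'gcp', 'google cloud', 'google cloud platform'},
--     'google cloud': {'gcp', 'google cloud', 'google cloud platform'},
--     'google cloud platform': {'gcp', 'google cloud', 'google cloud platform'},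
--     'azure': {'azure', 'microsoft azure'},
--     'microsoft azure': {'azure', 'microsoft azure'},
--     'docker': {'docker', 'containerization'},
--     'containerization': {'docker', 'containerization'},
--     'kubernetes': {'kubernetes', 'k8s'},
--     'k8s': {'kubernetes', 'k8s'},
--     'rest api': {'rest api', 'restful', 'rest apis'},
--     'restful': {'rest api', 'restful', 'rest apis'},
--     'rest apis': {'rest api', 'restful', 'rest apis'},
--     'graphql': {'graphql', 'gql'},
--     'gql': {'graphql', 'gql'},
--     'machine learning': {'machine learning', 'ml'},
--     'ml': {'machine learning', 'ml'},
--     'artificial intelligence': {'artificial intelligence', 'ai'},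
--     'ai': {'artificial intelligence', 'ai'},
--     'natural language processing': {'natural language processing', 'nlp'},
--     'nlp': {'natural language processing', 'nlp'},
--     'langchain': {'langchain', 'lang chain'},
--     'lang chain': {'langchain', 'lang chain'},
-- }
--
--
-- def get_skill_variants(skill):
--     skill_lower = skill.lower()
--     return {skill_lower} | _REVERSE_INDEX.get(skill_lower, set())
-- ===== Notes on version B (the rewrite author's own statement) =====
-- stated objective: faster
-- what changed: Replaces A's per-call scan over every SKILL_ALIASES entry with a precomputed module-level reverse-index table mapping each term directly to its variant group, so a call is one dict lookup plus a set union.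
import Mathlib
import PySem

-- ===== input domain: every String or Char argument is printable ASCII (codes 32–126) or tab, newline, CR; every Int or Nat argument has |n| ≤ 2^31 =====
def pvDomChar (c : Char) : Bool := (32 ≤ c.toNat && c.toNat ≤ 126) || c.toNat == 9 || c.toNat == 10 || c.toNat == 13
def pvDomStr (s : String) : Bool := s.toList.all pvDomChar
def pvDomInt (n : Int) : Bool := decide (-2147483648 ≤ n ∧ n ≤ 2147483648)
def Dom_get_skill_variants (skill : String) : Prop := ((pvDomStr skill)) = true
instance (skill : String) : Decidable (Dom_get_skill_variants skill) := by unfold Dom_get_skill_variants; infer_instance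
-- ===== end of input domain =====

-- B replaces A's per-call scan of SKILL_ALIASES with a precomputed reverse-index table, one lookup per call (faster by a constant mechanism).

-- ===== PORT A =====
def SKILL_ALIASES : PySem.Dict String (List String) := PySem.Dict.ofList [
  ("python", ["python3", "py"]),
  ("javascript", ["js", "ecmascript"]),
  ("typescript", ["ts"]),
  ("react", ["reactjs", "react.js"]),
  ("angular", ["angularjs", "angular.js"]),
  ("vue", ["vuejs", "vue.js"]),
  ("node", ["nodejs", "node.js"]),
  ("postgres", ["postgresql", "psql"]),
  ("mysql", ["mariadb"]),
  ("mongodb", ["mongo"]),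
  ("aws", ["amazon web services"]),
  ("gcp", ["google cloud", "google cloud platform"]),
  ("azure", ["microsoft azure"]),
  ("docker", ["containerization"]),
  ("kubernetes", ["k8s"]),
  ("rest api", ["restful", "rest apis"]),
  ("graphql", ["gql"]),
  ("machine learning", ["ml"]),
  ("artificial intelligence", ["ai"]),
  ("natural language processing", ["nlp"]),
  ("langchain", ["lang chain"])]

def get_skill_variants (skill : String) : List String :=
  let skill_lower := PySem.Str.lower skill
  let variants : PySem.Set String := PySem.Set.ofList [skill_lower]
  let variants :=
    if PySem.Dict.contains SKILL_ALIASES skill_lower then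
      PySem.Set.update variants (PySem.Dict.getD SKILL_ALIASES skill_lower [])
    else variants
  (PySem.Dict.items SKILL_ALIASES).foldl (fun vs p =>
    if p.2.contains skill_lower || skill_lower == p.1 then
      PySem.Set.update (PySem.Set.add vs p.1) p.2
    else vs) variants

-- ===== PORT B =====
-- precomputed module-level reverse-index table: each term maps to its whole group
def REVERSE_INDEX : PySem.Dict String (List String) := PySem.Dict.ofList [
  ("python", ["python", "python3", "py"]),
  ("python3", ["python", "python3", "py"]),
  ("py", ["python", "python3", "py"]),
  ("javascript", ["javascript", "js", "ecmascript"]),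
  ("js", ["javascript", "js", "ecmascript"]),
  ("ecmascript", ["javascript", "js", "ecmascript"]),
  ("typescript", ["typescript", "ts"]),
  ("ts", ["typescript", "ts"]),
  ("react", ["react", "reactjs", "react.js"]),
  ("reactjs", ["react", "reactjs", "react.js"]),
  ("react.js", ["react", "reactjs", "react.js"]),
  ("angular", ["angular", "angularjs", "angular.js"]),
  ("angularjs", ["angular", "angularjs", "angular.js"]),
  ("angular.js", ["angular", "angularjs", "angular.js"]),
  ("vue", ["vue", "vuejs", "vue.js"]),
  ("vuejs", ["vue", "vuejs", "vue.js"]),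
  ("vue.js", ["vue", "vuejs", "vue.js"]),
  ("node", ["node", "nodejs", "node.js"]),
  ("nodejs", ["node", "nodejs", "node.js"]),
  ("node.js", ["node", "nodejs", "node.js"]),
  ("postgres", ["postgres", "postgresql", "psql"]),
  ("postgresql", ["postgres", "postgresql", "psql"]),
  ("psql", ["postgres", "postgresql", "psql"]),
  ("mysql", ["mysql", "mariadb"]),
  ("mariadb", ["mysql", "mariadb"]),
  ("mongodb", ["mongodb", "mongo"]),
  ("mongo", ["mongodb", "mongo"]),
  ("aws", ["aws", "amazon web services"]),
  ("amazon web services", ["aws", "amazon web services"]),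
  ("gcp", ["gcp", "google cloud", "google cloud platform"]),
  ("google cloud", ["gcp", "google cloud", "google cloud platform"]),
  ("google cloud platform", ["gcp", "google cloud", "google cloud platform"]),
  ("azure", ["azure", "microsoft azure"]),
  ("microsoft azure", ["azure", "microsoft azure"]),
  ("docker", ["docker", "containerization"]),
  ("containerization", ["docker", "containerization"]),
  ("kubernetes", ["kubernetes", "k8s"]),
  ("k8s", ["kubernetes", "k8s"]),
  ("rest api", ["rest api", "restful", "rest apis"]),
  ("restful", ["rest api", "restful", "rest apis"]),
  ("rest apis", ["rest api", "restful", "rest apis"]),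
  ("graphql", ["graphql", "gql"]),
  ("gql", ["graphql", "gql"]),
  ("machine learning", ["machine learning", "ml"]),
  ("ml", ["machine learning", "ml"]),
  ("artificial intelligence", ["artificial intelligence", "ai"]),
  ("ai", ["artificial intelligence", "ai"]),
  ("natural language processing", ["natural language processing", "nlp"]),
  ("nlp", ["natural language processing", "nlp"]),
  ("langchain", ["langchain", "lang chain"]),
  ("lang chain", ["langchain", "lang chain"])]

def get_skill_variants_alt (skill : String) : List String :=
  let skill_lower := PySem.Str.lower skill
  PySem.Set.union (PySem.Set.ofList [skill_lower]) (PySem.Dict.getD REVERSE_INDEX skill_lower [])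

-- ===== PRECONDITION & SPEC =====
def Spec_get_skill_variants (skill : String) (out : List String) : Prop := out = get_skill_variants_alt skill
instance (skill : String) (out : List String) : Decidable (Spec_get_skill_variants skill out) := by unfold Spec_get_skill_variants; infer_instance

-- ===== CLAIM (what is proved, stated in full; the proofs are below) =====
def Claim_equal_get_skill_variants : Prop := ∀ (skill : String), Dom_get_skill_variants skill → Spec_get_skill_variants skill (get_skill_variants skill)

-- ===== LEMMAS AND PROOFS =====
-- every string occurring anywhere in SKILL_ALIASES (keys and aliases)
def TERMS : List String := [
  "python",
  "python3",
  "py",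
  "javascript",
  "js",
  "ecmascript",
  "typescript",
  "ts",
  "react",
  "reactjs",
  "react.js",
  "angular",
  "angularjs",
  "angular.js",
  "vue",
  "vuejs",
  "vue.js",
  "node",
  "nodejs",
  "node.js",
  "postgres",
  "postgresql",
  "psql",
  "mysql",
  "mariadb",
  "mongodb",
  "mongo",
  "aws",
  "amazon web services",
  "gcp",
  "google cloud",
  "google cloud platform",
  "azure",
  "microsoft azure",
  "docker",
  "containerization",
  "kubernetes",
  "k8s",
  "rest api",
  "restful",
  "rest apis",
  "graphql",
  "gql",
  "machine learning",
  "ml",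
  "artificial intelligence",
  "ai",
  "natural language processing",
  "nlp",
  "langchain",
  "lang chain"]

lemma foldl_if_noop {a b : Type} (f : List b -> a -> List b) (c : a -> Bool)
    (l : List a) (v : List b) (h : forall p, p ∈ l -> c p = false) :
    l.foldl (fun vs p => if c p then f vs p else vs) v = v := by
  induction l generalizing v with
  | nil => rfl
  | cons x t ih =>
    rw [List.foldl_cons, if_neg (by simp [h x List.mem_cons_self])]
    exact ih v (fun p hp => h p (List.mem_cons_of_mem x hp))

set_option maxRecDepth 8000 in
lemma core_eq (s : String) (h : s ∉ TERMS) :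
    ((PySem.Dict.items SKILL_ALIASES).foldl (fun vs p =>
      if p.2.contains s || s == p.1 then
        PySem.Set.update (PySem.Set.add vs p.1) p.2
      else vs)
      (if PySem.Dict.contains SKILL_ALIASES s then
        PySem.Set.update (PySem.Set.ofList [s]) (PySem.Dict.getD SKILL_ALIASES s [])
      else PySem.Set.ofList [s]))
    = PySem.Set.union (PySem.Set.ofList [s]) (PySem.Dict.getD REVERSE_INDEX s []) := by
  have hcA : PySem.Dict.contains SKILL_ALIASES s = false := by
    rw [PySem.Dict.contains_eq_decide_mem_keys]
    have hk : forall t, t ∈ PySem.Dict.keys SKILL_ALIASES -> t ∈ TERMS := by decide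
    simp only [decide_eq_false_iff_not]
    exact fun hm => h (hk s hm)
  have hcR : PySem.Dict.contains REVERSE_INDEX s = false := by
    rw [PySem.Dict.contains_eq_decide_mem_keys]
    have hk : forall t, t ∈ PySem.Dict.keys REVERSE_INDEX -> t ∈ TERMS := by decide
    simp only [decide_eq_false_iff_not]
    exact fun hm => h (hk s hm)
  rw [hcA, if_neg (by simp), PySem.Dict.getD_of_not_contains _ _ hcR]
  rw [foldl_if_noop]
  · rfl
  · intro p hp
    have hterm : forall q, q ∈ PySem.Dict.items SKILL_ALIASES ->
        q.1 ∈ TERMS ∧ forall x, x ∈ q.2 -> x ∈ TERMS := by decide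
    have h1 : (s == p.1) = false :=
      beq_eq_false_iff_ne.mpr (fun e => h (e ▸ (hterm p hp).1))
    have h2 : s ∉ p.2 := fun hm => h ((hterm p hp).2 s hm)
    simp [h1, h2]

-- ===== VERDICT (by name: the statement is the Claim_ definition above) =====
set_option maxRecDepth 8000 in
theorem get_skill_variants_spec : Claim_equal_get_skill_variants := by
  intro skill _
  unfold Spec_get_skill_variants
  simp only [get_skill_variants, get_skill_variants_alt]
  generalize PySem.Str.lower skill = s
  by_cases h : s ∈ TERMS
  · simp only [TERMS, List.mem_cons, List.not_mem_nil, or_false] at h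
    rcases h with h|h|h|h|h|h|h|h|h|h|h|h|h|h|h|h|h|h|h|h|h|h|h|h|h|h|h|h|h|h|h|h|h|h|h|h|h|h|h|h|h|h|h|h|h|h|h|h|h|h|h <;> subst h <;> decide
  · exact core_eq s h
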